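-- pv_equiv track=rewrite | github.com/quanttraderkim/memguard | benchmarks/isb/run.py | fit_forward
-- ===== SOURCE A (Python) =====
-- from typing import Any, Dict, List
--
-- def estimate_tokens(text: str) -> int:
--     return max(len(text) // 4, 1)
--
-- def fit_forward(items: List[str], budget: int) -> List[str]:
--     selected: List[str] = []
--     used = 0
--     for item in items:
--         cost = estimate_tokens(item)
--         if selected and used + cost > budget:
--             break
--         selected.append(item)
--         used += cost
--     return selected
-- ===== SOURCE B (Python) =====
-- from itertools import accumulate
-- from typing import List
--
--
-- def estimate_tokens(text: str) -> int:
--     return max(len(text) // 4, 1)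
--
--
-- def fit_forward(items: List[str], budget: int) -> List[str]:
--     if not items:
--         return []
--     cums = list(accumulate(estimate_tokens(x) for x in items))
--     # cums is strictly increasing (every cost >= 1), so the number of
--     # prefixes within budget is the cut point; the first item is always kept.
--     k = max(1, sum(c <= budget for c in cums))
--     return items[:k]
-- ===== Notes on version B (the rewrite author's own statement) =====
-- stated objective: alternative
-- what changed: Replaced the stateful accumulate-and-break loop by prefix sums (itertools.accumulate) plus a count of within-budget prefixes (valid because costs are >= 1, so prefix sums are strictly increasing), taking items[:max(1, count)].
import Mathlib
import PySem

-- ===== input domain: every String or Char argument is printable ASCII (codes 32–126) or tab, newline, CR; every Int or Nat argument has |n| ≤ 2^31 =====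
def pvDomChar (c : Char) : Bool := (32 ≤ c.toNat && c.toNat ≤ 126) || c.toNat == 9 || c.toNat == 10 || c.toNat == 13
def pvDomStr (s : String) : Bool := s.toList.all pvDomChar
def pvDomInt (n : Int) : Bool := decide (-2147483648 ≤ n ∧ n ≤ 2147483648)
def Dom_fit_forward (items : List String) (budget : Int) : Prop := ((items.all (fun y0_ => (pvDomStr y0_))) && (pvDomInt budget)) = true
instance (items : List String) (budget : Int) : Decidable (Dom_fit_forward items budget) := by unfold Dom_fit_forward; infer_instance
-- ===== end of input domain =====

-- B replaces A's stateful accumulate-and-break loop by prefix sums plus a count of within-budget prefixes (alternative decomposition, same O(n) cost).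


-- ===== PORT A =====
def estimate_tokens (text : String) : Int := max (PySem.Int.floordiv (PySem.Str.len text) 4) 1

-- A's for-loop with break, as structural recursion over the items with (selected, used) state
def fit_forward_go (budget : Int) : List String → List String → Int → List String
  | [], sel, _ => sel
  | item :: rest, sel, used =>
    let cost := estimate_tokens item
    if sel ≠ [] ∧ budget < used + cost then sel
    else fit_forward_go budget rest (sel ++ [item]) (used + cost)

def fit_forward (items : List String) (budget : Int) : List String :=
  fit_forward_go budget items [] 0

-- ===== PORT B =====
-- itertools.accumulate of the costs, starting from s
def pvAccum : List Int → Int → List Int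
  | [], _ => []
  | c :: cs, s => (s + c) :: pvAccum cs (s + c)

def fit_forward_alt (items : List String) (budget : Int) : List String :=
  match items with
  | [] => []
  | _ :: _ =>
    let cums := pvAccum (items.map estimate_tokens) 0
    let k := max 1 (cums.countP (fun c => decide (c ≤ budget)))
    items.take k

-- ===== PRECONDITION & SPEC =====
def Spec_fit_forward (items : List String) (budget : Int) (out : List String) : Prop := out = fit_forward_alt items budget
instance (items : List String) (budget : Int) (out : List String) : Decidable (Spec_fit_forward items budget out) := by unfold Spec_fit_forward; infer_instance

-- ===== CLAIM (what is proved, stated in full; the proofs are below) =====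
def Claim_equal_fit_forward : Prop := ∀ (items : List String) (budget : Int), Dom_fit_forward items budget → Spec_fit_forward items budget (fit_forward items budget)

-- ===== LEMMAS AND PROOFS =====

-- proof helper: how many further items A's loop takes, given the tokens already used
def pvCut (budget : Int) : List Int → Int → Nat
  | [], _ => 0
  | c :: cs, used => if budget < used + c then 0 else 1 + pvCut budget cs (used + c)

theorem one_le_estimate_tokens (x : String) : 1 ≤ estimate_tokens x := le_max_right _ _

theorem fit_forward_go_eq_take (budget : Int) :
    ∀ (rest sel : List String) (used : Int), sel ≠ [] →
      fit_forward_go budget rest sel used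
        = sel ++ rest.take (pvCut budget (rest.map estimate_tokens) used) := by
  intro rest
  induction rest with
  | nil => intro sel used _; simp [fit_forward_go, pvCut]
  | cons item rest ih =>
    intro sel used hsel
    simp only [fit_forward_go, List.map_cons, pvCut]
    by_cases h : budget < used + estimate_tokens item
    · simp [h, hsel]
    · simp only [h, and_false, if_neg, not_false_iff]
      rw [ih (sel ++ [item]) (used + estimate_tokens item) (by simp)]
      rw [Nat.add_comm, List.take_succ_cons]
      simp

theorem countP_accum_zero (budget : Int) :
    ∀ (cs : List Int) (s : Int), (∀ c ∈ cs, (1:Int) ≤ c) → budget < s →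
      (pvAccum cs s).countP (fun c => decide (c ≤ budget)) = 0 := by
  intro cs
  induction cs with
  | nil => intro s _ _; simp [pvAccum]
  | cons c cs ih =>
    intro s hcs hs
    have hc : (1:Int) ≤ c := hcs c (by simp)
    have h1 : budget < s + c := by omega
    simp only [pvAccum, List.countP_cons]
    rw [ih (s + c) (fun d hd => hcs d (by simp [hd])) h1]
    simp [not_le.mpr h1]

theorem pvCut_eq_countP (budget : Int) :
    ∀ (cs : List Int) (s : Int), (∀ c ∈ cs, (1:Int) ≤ c) →
      pvCut budget cs s = (pvAccum cs s).countP (fun c => decide (c ≤ budget)) := by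
  intro cs
  induction cs with
  | nil => intro s _; simp [pvCut, pvAccum]
  | cons c cs ih =>
    intro s hcs
    have hc : (1:Int) ≤ c := hcs c (by simp)
    simp only [pvCut, pvAccum, List.countP_cons]
    by_cases h : budget < s + c
    · rw [if_pos h, countP_accum_zero budget cs (s + c) (fun d hd => hcs d (by simp [hd])) h]
      simp [not_le.mpr h]
    · rw [if_neg h, ih (s + c) (fun d hd => hcs d (by simp [hd]))]
      simp [not_lt.mp h, Nat.add_comm]

-- ===== VERDICT (by name: the statement is the Claim_ definition above) =====
theorem fit_forward_spec : Claim_equal_fit_forward := by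
  intro items budget _
  unfold Spec_fit_forward
  cases items with
  | nil => rfl
  | cons x rest =>
    have hmem : ∀ c ∈ rest.map estimate_tokens, (1:Int) ≤ c := by
      intro c hc
      rcases List.mem_map.mp hc with ⟨y, _, rfl⟩
      exact one_le_estimate_tokens y
    have hA : fit_forward (x :: rest) budget
        = x :: rest.take (pvCut budget (rest.map estimate_tokens) (estimate_tokens x)) := by
      show fit_forward_go budget (x :: rest) [] 0 = _
      simp only [fit_forward_go]
      rw [if_neg (by simp)]
      rw [show ([] : List String) ++ [x] = [x] from rfl,
          fit_forward_go_eq_take budget rest [x] (0 + estimate_tokens x) (by simp)]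
      simp
    rw [hA]
    show _ = (x :: rest).take (max 1 ((pvAccum ((x :: rest).map estimate_tokens) 0).countP
                (fun c => decide (c ≤ budget))))
    simp only [List.map_cons, pvAccum, List.countP_cons, Int.zero_add]
    rw [← pvCut_eq_countP budget (rest.map estimate_tokens) (estimate_tokens x) hmem]
    by_cases hx : estimate_tokens x ≤ budget
    · have : (max 1 (pvCut budget (rest.map estimate_tokens) (estimate_tokens x)
          + if decide (estimate_tokens x ≤ budget) = true then 1 else 0))
          = pvCut budget (rest.map estimate_tokens) (estimate_tokens x) + 1 := by
        simp only [hx, decide_true, if_pos]; omega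
      rw [this, List.take_succ_cons]
    · have hlt : budget < estimate_tokens x := not_le.mp hx
      have hcut : pvCut budget (rest.map estimate_tokens) (estimate_tokens x) = 0 := by
        rw [pvCut_eq_countP budget (rest.map estimate_tokens) (estimate_tokens x) hmem]
        exact countP_accum_zero budget _ _ hmem hlt
      simp [hcut, hx]
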